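-- pv_equiv track=rewrite | github.com/Aung-myat-min/share | python/nth.py | block_print
-- ===== SOURCE A (Python) =====
-- def block_print(string):
--     string = string.lower().strip()
--     if not string:
--         return ''
--     res = []
--     k = ''
--     letters = {
--         'a':' AAA \nA   A\nA   A\nAAAAA\nA   A\nA   A\nA   A',
--         'b':'BBBB \nB   B\nB   B\nBBBB \nB   B\nB   B\nBBBB ',
--         'c':' CCC \nC   C\nC    \nC    \nC    \nC   C\n CCC ',
--         'd':'DDDD \nD   D\nD   D\nD   D\nD   D\nD   D\nDDDD ',
--         'e':'EEEEE\nE    \nE    \nEEEEE\nE    \nE    \nEEEEE',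
--         'f':'FFFFF\nF    \nF    \nFFFFF\nF    \nF    \nF    ',
--         'g':' GGG \nG   G\nG    \nG GGG\nG   G\nG   G\n GGG ',
--         'h':'H   H\nH   H\nH   H\nHHHHH\nH   H\nH   H\nH   H',
--         'i':'IIIII\n  I  \n  I  \n  I  \n  I  \n  I  \nIIIII',
--         'j':'JJJJJ\n    J\n    J\n    J\n    J\n    J\nJJJJ ',
--         'k':'K   K\nK  K \nK K  \nKK   \nK K  \nK  K \nK   K',
--         'l':'L    \nL    \nL    \nL    \nL    \nL    \nLLLLL',
--         'm':'M   M\nMM MM\nM M M\nM   M\nM   M\nM   M\nM   M',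
--         'n':'N   N\nNN  N\nN   N\nN N N\nN   N\nN  NN\nN   N',
--         'o':' OOO \nO   O\nO   O\nO   O\nO   O\nO   O\n OOO ',
--         'p':'PPPP \nP   P\nP   P\nPPPP \nP    \nP    \nP    ',
--         'q':' QQQ \nQ   Q\nQ   Q\nQ   Q\nQ Q Q\nQ  QQ\n QQQQ',
--         'r':'RRRR \nR   R\nR   R\nRRRR \nR R  \nR  R \nR   R',
--         's':' SSS \nS   S\nS    \n SSS \n    S\nS   S\n SSS ',
--         't':'TTTTT\n  T  \n  T  \n  T  \n  T  \n  T  \n  T  ',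
--         'u':'U   U\nU   U\nU   U\nU   U\nU   U\nU   U\n UUU ',
--         'v':'V   V\nV   V\nV   V\nV   V\nV   V\n V V \n  V  ',
--         'w':'W   W\nW   W\nW   W\nW W W\nW W W\nW W W\n W W ',
--         'x':'X   X\nX   X\n X X \n  X  \n X X \nX   X\nX   X',
--         'y':'Y   Y\nY   Y\n Y Y \n  Y  \n  Y  \n  Y  \n  Y  ',
--         'z':'ZZZZZ\n    Z\n   Z \n  Z  \n Z   \nZ    \nZZZZZ',
--         ' ':'     \n     \n     \n     \n     \n     \n     ',
--     }
--     for i in range(7):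
--         for j in string:
--             if j in letters.keys():
--                 k += letters[j].split('\n')[i] + ' '
--         res.append(k.rstrip())
--         k = ''
--     return '\n'.join(res)
-- ===== SOURCE B (Python) =====
-- def block_print(string):
--     string = string.lower().strip()
--     if not string:
--         return ''
--     letters = {
--         'a':' AAA \nA   A\nA   A\nAAAAA\nA   A\nA   A\nA   A',
--         'b':'BBBB \nB   B\nB   B\nBBBB \nB   B\nB   B\nBBBB ',
--         'c':' CCC \nC   C\nC    \nC    \nC    \nC   C\n CCC ',
--         'd':'DDDD \nD   D\nD   D\nD   D\nD   D\nD   D\nDDDD ',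
--         'e':'EEEEE\nE    \nE    \nEEEEE\nE    \nE    \nEEEEE',
--         'f':'FFFFF\nF    \nF    \nFFFFF\nF    \nF    \nF    ',
--         'g':' GGG \nG   G\nG    \nG GGG\nG   G\nG   G\n GGG ',
--         'h':'H   H\nH   H\nH   H\nHHHHH\nH   H\nH   H\nH   H',
--         'i':'IIIII\n  I  \n  I  \n  I  \n  I  \n  I  \nIIIII',
--         'j':'JJJJJ\n    J\n    J\n    J\n    J\n    J\nJJJJ ',
--         'k':'K   K\nK  K \nK K  \nKK   \nK K  \nK  K \nK   K',
--         'l':'L    \nL    \nL    \nL    \nL    \nL    \nLLLLL',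
--         'm':'M   M\nMM MM\nM M M\nM   M\nM   M\nM   M\nM   M',
--         'n':'N   N\nNN  N\nN   N\nN N N\nN   N\nN  NN\nN   N',
--         'o':' OOO \nO   O\nO   O\nO   O\nO   O\nO   O\n OOO ',
--         'p':'PPPP \nP   P\nP   P\nPPPP \nP    \nP    \nP    ',
--         'q':' QQQ \nQ   Q\nQ   Q\nQ   Q\nQ Q Q\nQ  QQ\n QQQQ',
--         'r':'RRRR \nR   R\nR   R\nRRRR \nR R  \nR  R \nR   R',
--         's':' SSS \nS   S\nS    \n SSS \n    S\nS   S\n SSS ',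
--         't':'TTTTT\n  T  \n  T  \n  T  \n  T  \n  T  \n  T  ',
--         'u':'U   U\nU   U\nU   U\nU   U\nU   U\nU   U\n UUU ',
--         'v':'V   V\nV   V\nV   V\nV   V\nV   V\n V V \n  V  ',
--         'w':'W   W\nW   W\nW   W\nW W W\nW W W\nW W W\n W W ',
--         'x':'X   X\nX   X\n X X \n  X  \n X X \nX   X\nX   X',
--         'y':'Y   Y\nY   Y\n Y Y \n  Y  \n  Y  \n  Y  \n  Y  ',
--         'z':'ZZZZZ\n    Z\n   Z \n  Z  \n Z   \nZ    \nZZZZZ',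
--         ' ':'     \n     \n     \n     \n     \n     \n     ',
--     }
--     # single pass over the string: grow a 7-row canvas by gluing each
--     # letter's block onto the right edge (zip appends a piece to each row buffer)
--     canvas = None
--     for c in string:
--         block = letters.get(c)
--         if block is None:
--             continue
--         rows = block.split('\n')
--         if canvas is None:
--             canvas = [[r] for r in rows]
--         else:
--             for buf, r in zip(canvas, rows):
--                 buf.append(r)
--     if canvas is None:
--         return '\n'.join([''] * 7)
--     return '\n'.join(' '.join(buf).rstrip() for buf in canvas)
-- ===== Notes on version B (the rewrite author's own statement) =====
-- stated objective: alternative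
-- what changed: B makes one pass over the string, gluing each letter's 7-row block onto the right edge of an accumulated canvas (zip appends a piece to each row buffer) and joins/rstrips the finished rows once; A instead makes 7 passes over the string (one per output row), re-splitting every letter's 35-char template on each pass and concatenating into a per-row string accumulator.
import Mathlib
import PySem

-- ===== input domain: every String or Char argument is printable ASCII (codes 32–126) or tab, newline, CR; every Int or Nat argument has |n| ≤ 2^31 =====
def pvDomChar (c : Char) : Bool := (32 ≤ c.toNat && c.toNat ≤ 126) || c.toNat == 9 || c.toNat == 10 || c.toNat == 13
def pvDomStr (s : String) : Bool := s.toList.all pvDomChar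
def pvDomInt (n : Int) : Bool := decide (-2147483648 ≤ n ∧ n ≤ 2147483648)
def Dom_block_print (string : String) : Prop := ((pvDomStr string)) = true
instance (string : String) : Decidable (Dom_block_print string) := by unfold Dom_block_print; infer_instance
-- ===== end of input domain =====

-- B renders the block letters in ONE pass over the string, gluing each letter's 7-row block onto
-- the right edge of an accumulated canvas (zip of row lists), instead of A's 7 per-row passes
-- that re-split every template; objective: alternative (same cost class, different traversal).

-- the letters table: shared data (A's and B's identical dict literal)
def pvLetters : PySem.Dict Char String := PySem.Dict.mk [
  ('a', " AAA \nA   A\nA   A\nAAAAA\nA   A\nA   A\nA   A"),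
  ('b', "BBBB \nB   B\nB   B\nBBBB \nB   B\nB   B\nBBBB "),
  ('c', " CCC \nC   C\nC    \nC    \nC    \nC   C\n CCC "),
  ('d', "DDDD \nD   D\nD   D\nD   D\nD   D\nD   D\nDDDD "),
  ('e', "EEEEE\nE    \nE    \nEEEEE\nE    \nE    \nEEEEE"),
  ('f', "FFFFF\nF    \nF    \nFFFFF\nF    \nF    \nF    "),
  ('g', " GGG \nG   G\nG    \nG GGG\nG   G\nG   G\n GGG "),
  ('h', "H   H\nH   H\nH   H\nHHHHH\nH   H\nH   H\nH   H"),
  ('i', "IIIII\n  I  \n  I  \n  I  \n  I  \n  I  \nIIIII"),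
  ('j', "JJJJJ\n    J\n    J\n    J\n    J\n    J\nJJJJ "),
  ('k', "K   K\nK  K \nK K  \nKK   \nK K  \nK  K \nK   K"),
  ('l', "L    \nL    \nL    \nL    \nL    \nL    \nLLLLL"),
  ('m', "M   M\nMM MM\nM M M\nM   M\nM   M\nM   M\nM   M"),
  ('n', "N   N\nNN  N\nN   N\nN N N\nN   N\nN  NN\nN   N"),
  ('o', " OOO \nO   O\nO   O\nO   O\nO   O\nO   O\n OOO "),
  ('p', "PPPP \nP   P\nP   P\nPPPP \nP    \nP    \nP    "),
  ('q', " QQQ \nQ   Q\nQ   Q\nQ   Q\nQ Q Q\nQ  QQ\n QQQQ"),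
  ('r', "RRRR \nR   R\nR   R\nRRRR \nR R  \nR  R \nR   R"),
  ('s', " SSS \nS   S\nS    \n SSS \n    S\nS   S\n SSS "),
  ('t', "TTTTT\n  T  \n  T  \n  T  \n  T  \n  T  \n  T  "),
  ('u', "U   U\nU   U\nU   U\nU   U\nU   U\nU   U\n UUU "),
  ('v', "V   V\nV   V\nV   V\nV   V\nV   V\n V V \n  V  "),
  ('w', "W   W\nW   W\nW   W\nW W W\nW W W\nW W W\n W W "),
  ('x', "X   X\nX   X\n X X \n  X  \n X X \nX   X\nX   X"),
  ('y', "Y   Y\nY   Y\n Y Y \n  Y  \n  Y  \n  Y  \n  Y  "),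
  ('z', "ZZZZZ\n    Z\n   Z \n  Z  \n Z   \nZ    \nZZZZZ"),
  (' ', "     \n     \n     \n     \n     \n     \n     ")
]

-- ===== PORT A =====
def block_print (string : String) : String :=
  let cs := PySem.Chars.strip (PySem.Chars.lower string.toList)
  if cs = [] then ""
  else
    let res := (PySem.List.pyRange 0 7 1).foldl (fun res i =>
      let k := cs.foldl (fun k j =>
        if pvLetters.contains j then
          k ++ (PySem.Chars.splitOn (pvLetters.getD j "").toList ['\n']).getD i.toNat [] ++ [' ']
        else k) ([] : List Char)
      res ++ [PySem.Chars.rstrip k]) ([] : List (List Char))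
    String.ofList (PySem.Chars.join ['\n'] res)

-- ===== PORT B =====
def block_print_alt (string : String) : String :=
  let cs := PySem.Chars.strip (PySem.Chars.lower string.toList)
  if cs = [] then ""
  else
    let canvas := cs.foldl (fun (acc : Option (List (List (List Char)))) c =>
      match pvLetters.get? c with
      | none => acc
      | some v =>
        let rows := PySem.Chars.splitOn v.toList ['\n']
        match acc with
        | none => some (rows.map (fun r => [r]))
        | some a => some (List.zipWith (fun buf r => buf ++ [r]) a rows)) none
    match canvas with
    | none => String.ofList (PySem.Chars.join ['\n'] (List.replicate 7 []))
    | some a => String.ofList (PySem.Chars.join ['\n']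
        (a.map (fun buf => PySem.Chars.rstrip (PySem.Chars.join [' '] buf))))

-- ===== PRECONDITION & SPEC =====
def Spec_block_print (string : String) (out : String) : Prop := out = block_print_alt string
instance (string : String) (out : String) : Decidable (Spec_block_print string out) := by unfold Spec_block_print; infer_instance

-- ===== CLAIM =====
def Claim_equal_block_print : Prop := ∀ (string : String), Dom_block_print string → Spec_block_print string (block_print string)

-- ===== LEMMAS AND PROOFS =====

-- the blocks of the valid letters of cs, each split into its 7 rows
def pvBlocks (cs : List Char) : List (List (List Char)) :=
  cs.filterMap (fun c => (pvLetters.get? c).map (fun v => PySem.Chars.splitOn v.toList ['\n']))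

-- the n-th row of the letter at char c (none if c is not in the table)
def pvRow (n : Nat) (c : Char) : Option (List Char) :=
  (pvLetters.get? c).map (fun v => (PySem.Chars.splitOn v.toList ['\n']).getD n [])

lemma pv_rstrip_append_space (l : List Char) :
    PySem.Chars.rstrip (l ++ [' ']) = PySem.Chars.rstrip l := by
  have h : PySem.Chars.isspace ' ' = true := by decide
  simp [PySem.Chars.rstrip, h]

lemma pv_join_cons (p : List Char) (ps : List (List Char)) (h : ps ≠ []) :
    PySem.Chars.join [' '] (p :: ps) = p ++ [' '] ++ PySem.Chars.join [' '] ps := by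
  cases ps with
  | nil => simp at h
  | cons q qs => simp [PySem.Chars.join, List.intercalate, List.intersperse]

lemma pv_flatten_eq_join (ps : List (List Char)) (h : ps ≠ []) :
    (ps.map (· ++ [' '])).flatten = PySem.Chars.join [' '] ps ++ [' '] := by
  induction ps with
  | nil => simp at h
  | cons p qs ih =>
    cases qs with
    | nil => simp [PySem.Chars.join, List.intercalate]
    | cons q rs =>
      rw [pv_join_cons p (q :: rs) (by simp), List.map_cons, List.flatten_cons, ih (by simp)]
      simp [List.append_assoc]

lemma pv_rstrip_flatten (ps : List (List Char)) :
    PySem.Chars.rstrip ((ps.map (· ++ [' '])).flatten)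
      = PySem.Chars.rstrip (PySem.Chars.join [' '] ps) := by
  cases hps : ps with
  | nil => rfl
  | cons p qs =>
    rw [← hps, pv_flatten_eq_join ps (by simp [hps]), pv_rstrip_append_space]

lemma pv_fold_eq_flatten (n : Nat) (cs : List Char) (k : List Char) :
    cs.foldl (fun k j =>
        if pvLetters.contains j then
          k ++ (PySem.Chars.splitOn (pvLetters.getD j "").toList ['\n']).getD n [] ++ [' ']
        else k) k
      = k ++ ((cs.filterMap (pvRow n)).map (· ++ [' '])).flatten := by
  induction cs generalizing k with
  | nil => simp
  | cons c cs ih =>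
    rw [List.foldl_cons, List.filterMap_cons]
    have hc := PySem.Dict.contains_eq_isSome_get? pvLetters c
    cases hg : pvLetters.get? c with
    | none =>
      rw [hg] at hc
      simp only [hc, Option.isSome_none, Bool.false_eq_true, if_false, pvRow, hg,
        Option.map_none]
      exact ih k
    | some v =>
      rw [hg] at hc
      simp only [hc, Option.isSome_some, if_true, pvRow, hg, Option.map_some]
      rw [ih]
      simp only [PySem.Dict.getD, hg, Option.getD_some, List.map_cons, List.flatten_cons,
        List.append_assoc, pvRow]

-- one of A's output rows: A's fold-and-rstrip equals rstrip of the ' '-join of the blocks' n-th rows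
lemma pv_row_eq (n : Nat) (cs : List Char) :
    PySem.Chars.rstrip (cs.foldl (fun k j =>
        if pvLetters.contains j then
          k ++ (PySem.Chars.splitOn (pvLetters.getD j "").toList ['\n']).getD n [] ++ [' ']
        else k) ([] : List Char))
      = PySem.Chars.rstrip (PySem.Chars.join [' '] ((pvBlocks cs).map (fun b => b.getD n []))) := by
  rw [pv_fold_eq_flatten, List.nil_append, pv_rstrip_flatten]
  congr 1
  simp [pvBlocks, List.map_filterMap, pvRow, Option.map_map, Function.comp_def]

-- every template in the table splits into exactly 7 rows
lemma pv_items_len : ∀ p ∈ pvLetters.items, (PySem.Chars.splitOn p.2.toList ['\n']).length = 7 := by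
  decide

lemma pv_block_len {c : Char} {v : String} (h : pvLetters.get? c = some v) :
    (PySem.Chars.splitOn v.toList ['\n']).length = 7 :=
  pv_items_len (c, v) (PySem.Dict.mem_items_of_get?_eq_some pvLetters h)

-- B's canvas fold, characterised via the blocks list
lemma pv_canvas_some (cs : List Char) (a : List (List (List Char))) :
    cs.foldl (fun (acc : Option (List (List (List Char)))) c =>
      match pvLetters.get? c with
      | none => acc
      | some v =>
        let rows := PySem.Chars.splitOn v.toList ['\n']
        match acc with
        | none => some (rows.map (fun r => [r]))
        | some a => some (List.zipWith (fun buf r => buf ++ [r]) a rows)) (some a)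
    = some ((pvBlocks cs).foldl (fun a r => List.zipWith (fun buf x => buf ++ [x]) a r) a) := by
  induction cs generalizing a with
  | nil => simp [pvBlocks]
  | cons c cs ih =>
    simp only [List.foldl_cons, pvBlocks, List.filterMap_cons]
    cases hg : pvLetters.get? c with
    | none => simpa [pvBlocks] using ih a
    | some v => simpa [pvBlocks] using ih (List.zipWith (fun buf x => buf ++ [x]) a (PySem.Chars.splitOn v.toList ['\n']))

lemma pv_canvas_none (cs : List Char) :
    cs.foldl (fun (acc : Option (List (List (List Char)))) c =>
      match pvLetters.get? c with
      | none => acc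
      | some v =>
        let rows := PySem.Chars.splitOn v.toList ['\n']
        match acc with
        | none => some (rows.map (fun r => [r]))
        | some a => some (List.zipWith (fun buf r => buf ++ [r]) a rows)) none
    = match pvBlocks cs with
      | [] => none
      | b :: bs => some (bs.foldl (fun a r => List.zipWith (fun buf x => buf ++ [x]) a r)
          (b.map (fun r => [r]))) := by
  induction cs with
  | nil => simp [pvBlocks]
  | cons c cs ih =>
    simp only [List.foldl_cons, pvBlocks, List.filterMap_cons]
    cases hg : pvLetters.get? c with
    | none => simpa [pvBlocks] using ih
    | some v => simpa [pvBlocks] using pv_canvas_some cs ((PySem.Chars.splitOn v.toList ['\n']).map (fun r => [r]))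

-- the buffer fold, row by row: buffer i collects the i-th rows of the blocks seen so far
lemma pv_foldl_buf (bs : List (List (List Char))) (a : List (List (List Char)))
    (ha : a.length = 7) (hbs : ∀ x ∈ bs, x.length = 7) :
    bs.foldl (fun a r => List.zipWith (fun buf x => buf ++ [x]) a r) a
      = (List.range 7).map (fun i => a.getD i [] ++ bs.map (fun r => r.getD i [])) := by
  induction bs generalizing a with
  | nil =>
    simp only [List.foldl_nil]
    apply List.ext_getElem
    · simp [ha]
    · intro i h1 h2
      simp only [List.length_map, List.length_range] at h2
      simp only [List.getElem_map, List.getElem_range, List.map_nil, List.append_nil]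
      rw [List.getD_eq_getElem a [] (by omega)]
  | cons r rs ih =>
    have hr : r.length = 7 := hbs r (by simp)
    have hz : (List.zipWith (fun buf x => buf ++ [x]) a r).length = 7 := by simp [ha, hr]
    rw [List.foldl_cons, ih (List.zipWith (fun buf x => buf ++ [x]) a r) hz
      (fun x hx => hbs x (by simp [hx]))]
    apply List.map_congr_left
    intro i hi
    have hi7 : i < 7 := List.mem_range.mp hi
    have h : (List.zipWith (fun buf x => buf ++ [x]) a r).getD i []
        = a.getD i [] ++ [r.getD i []] := by
      rw [List.getD_eq_getElem _ [] (by omega), List.getD_eq_getElem a [] (by omega),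
        List.getD_eq_getElem r [] (by omega), List.getElem_zipWith]
    rw [h]
    simp

-- ===== VERDICT =====
theorem block_print_spec : Claim_equal_block_print := by
  intro s _
  unfold Spec_block_print block_print block_print_alt
  by_cases h : PySem.Chars.strip (PySem.Chars.lower s.toList) = []
  · simp only [h, if_true]
  · simp only [h, if_false]
    set cs := PySem.Chars.strip (PySem.Chars.lower s.toList) with hcs
    have hr : PySem.List.pyRange 0 7 1 = [0, 1, 2, 3, 4, 5, 6] := by decide
    rw [hr, PySem.List.foldl_append_singleton_eq_map, List.nil_append]
    simp only [List.map_cons, List.map_nil, pv_row_eq]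
    rw [pv_canvas_none]
    cases hbl : pvBlocks cs with
    | nil => simp [PySem.Chars.join, List.intercalate, PySem.Chars.rstrip, List.replicate]
    | cons b bs =>
      have hmem : ∀ x ∈ b :: bs, x.length = 7 := by
        intro x hx
        rw [← hbl] at hx
        obtain ⟨c, _, hc⟩ := List.mem_filterMap.mp hx
        obtain ⟨v, hv, rfl⟩ := Option.map_eq_some_iff.mp hc
        exact pv_block_len hv
      have hb7 : (b.map (fun r => [r])).length = 7 := by
        simp [hmem b (by simp)]
      dsimp only
      rw [pv_foldl_buf bs (b.map (fun r => [r])) hb7 (fun x hx => hmem x (by simp [hx]))]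
      refine congrArg String.ofList (congrArg (PySem.Chars.join ['\n']) ?_)
      have hrow : ∀ i : Nat, i < 7 →
          (b.map (fun r => [r])).getD i [] ++ bs.map (fun r => r.getD i [])
            = (b :: bs).map (fun r => r.getD i []) := by
        intro i hi
        have hbl7 : b.length = 7 := hmem b (by simp)
        rw [List.getD_eq_getElem _ [] (by simp [hbl7]; omega), List.getElem_map,
          List.map_cons, ← List.getD_eq_getElem b [] (by omega)]
        simp
      simp only [List.map_map]
      have h7 : List.range 7 = [0, 1, 2, 3, 4, 5, 6] := by rfl
      rw [h7]
      simp only [List.map_cons, List.map_nil, Function.comp]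
      rw [hrow 0 (by omega), hrow 1 (by omega), hrow 2 (by omega), hrow 3 (by omega),
        hrow 4 (by omega), hrow 5 (by omega), hrow 6 (by omega)]
      rfl
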